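-- pv_equiv track=rewrite | github.com/hansol444/-dashboard | Placement survey/Placement survey 자동화 revive/audit_v3.py | parse_args_toplevel
-- ===== SOURCE A (Python) =====
-- def parse_args_toplevel(inner):
--     """Parse top-level comma-separated args respecting nesting."""
--     parts = []
--     depth = 0
--     current = ""
--     for ch in inner:
--         if ch == '(':
--             depth += 1
--             current += ch
--         elif ch == ')':
--             depth -= 1
--             current += ch
--         elif ch == ',' and depth == 0:
--             parts.append(current.strip())
--             current = ""
--         else:
--             current += ch
--     if current.strip():
--         parts.append(current.strip())
--     return parts
-- ===== SOURCE B (Python) =====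
-- def _first_top_comma(s):
--     """Index of the first comma at parenthesis depth 0, or None."""
--     depth = 0
--     for i, ch in enumerate(s):
--         if ch == '(':
--             depth += 1
--         elif ch == ')':
--             depth -= 1
--         elif ch == ',' and depth == 0:
--             return i
--     return None
--
--
-- def parse_args_toplevel(inner):
--     """Parse top-level comma-separated args respecting nesting."""
--     parts = []
--     rest = inner
--     while True:
--         i = _first_top_comma(rest)
--         if i is None:
--             break
--         parts.append(rest[:i].strip())
--         rest = rest[i + 1:]
--     tail = rest.strip()
--     if tail:
--         parts.append(tail)
--     return parts
-- ===== Notes on version B (the rewrite author's own statement) =====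
-- stated objective: alternative
-- what changed: B replaces A's single fold carrying a growing character buffer by a cut-point decomposition: a helper scans only for the index of the first top-level comma, and the driver repeatedly slices off and strips the segment before that comma, finally appending the stripped remainder only if nonempty.
import Mathlib
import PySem

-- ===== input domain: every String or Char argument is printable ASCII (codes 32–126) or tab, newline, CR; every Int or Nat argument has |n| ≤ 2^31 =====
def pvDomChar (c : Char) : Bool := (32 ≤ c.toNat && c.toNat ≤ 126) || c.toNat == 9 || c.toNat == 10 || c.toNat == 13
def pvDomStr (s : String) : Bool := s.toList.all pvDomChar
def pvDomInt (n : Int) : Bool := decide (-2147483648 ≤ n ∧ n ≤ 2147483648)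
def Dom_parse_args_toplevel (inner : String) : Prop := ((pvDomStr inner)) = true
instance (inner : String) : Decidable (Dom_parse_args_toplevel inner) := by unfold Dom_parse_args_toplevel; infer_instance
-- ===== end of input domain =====

-- B replaces A's buffer-carrying fold by a repeated find-first-top-level-comma / slice / strip decomposition; same O(n) cost.

-- ===== PORT A =====
-- loop body over (parts, depth, current)
def stepA (st : List (List Char) × Int × List Char) (ch : Char) : List (List Char) × Int × List Char :=
  if ch = '(' then (st.1, st.2.1 + 1, st.2.2 ++ [ch])
  else if ch = ')' then (st.1, st.2.1 - 1, st.2.2 ++ [ch])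
  else if ch = ',' ∧ st.2.1 = 0 then (st.1 ++ [PySem.Chars.strip st.2.2], st.2.1, [])
  else (st.1, st.2.1, st.2.2 ++ [ch])

def parse_args_toplevel (inner : String) : List String :=
  let st := inner.toList.foldl stepA ([], 0, [])
  let parts := if PySem.Chars.strip st.2.2 ≠ [] then st.1 ++ [PySem.Chars.strip st.2.2] else st.1
  parts.map String.ofList

-- ===== PORT B =====
-- `_first_top_comma`: enumerate-with-depth scan, index of the first comma at depth 0 (None → none)
def firstTopComma (depth : Int) : List Char → Option Nat
  | [] => none
  | c :: cs =>
    if c = '(' then (firstTopComma (depth + 1) cs).map (· + 1)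
    else if c = ')' then (firstTopComma (depth - 1) cs).map (· + 1)
    else if c = ',' ∧ depth = 0 then some 0
    else (firstTopComma depth cs).map (· + 1)

theorem firstTopComma_lt (d : Int) (cs : List Char) (i : Nat)
    (h : firstTopComma d cs = some i) : i < cs.length := by
  induction cs generalizing d i with
  | nil => simp [firstTopComma] at h
  | cons c cs ih =>
    unfold firstTopComma at h
    split_ifs at h with h1 h2 h3
    · rcases Option.map_eq_some_iff.mp h with ⟨j, hj, rfl⟩
      have := ih _ _ hj; simp; omega
    · rcases Option.map_eq_some_iff.mp h with ⟨j, hj, rfl⟩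
      have := ih _ _ hj; simp; omega
    · cases h; simp
    · rcases Option.map_eq_some_iff.mp h with ⟨j, hj, rfl⟩
      have := ih _ _ hj; simp; omega

-- the while loop over `rest` (the slices rest[:i] / rest[i+1:] are take/drop: 0 ≤ i < len rest)
def altGo (rest : List Char) : List (List Char) :=
  if h : (firstTopComma 0 rest).isSome then
    let i := (firstTopComma 0 rest).get h
    PySem.Chars.strip (rest.take i) :: altGo (rest.drop (i + 1))
  else
    let tail := PySem.Chars.strip rest
    if tail ≠ [] then [tail] else []
termination_by rest.length
decreasing_by
  have := firstTopComma_lt 0 rest _ (Option.some_get h).symm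
  simp; omega

def parse_args_toplevel_alt (inner : String) : List String :=
  (altGo inner.toList).map String.ofList

-- ===== PRECONDITION & SPEC =====
def Spec_parse_args_toplevel (inner : String) (out : List String) : Prop := out = parse_args_toplevel_alt inner
instance (inner : String) (out : List String) : Decidable (Spec_parse_args_toplevel inner out) := by unfold Spec_parse_args_toplevel; infer_instance

-- ===== CLAIM (what is proved, stated in full; the proofs are below) =====
def Claim_equal_parse_args_toplevel : Prop := ∀ (inner : String), Dom_parse_args_toplevel inner → Spec_parse_args_toplevel inner (parse_args_toplevel inner)

-- ===== LEMMAS AND PROOFS =====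
def finishA (st : List (List Char) × Int × List Char) : List (List Char) :=
  if PySem.Chars.strip st.2.2 ≠ [] then st.1 ++ [PySem.Chars.strip st.2.2] else st.1

def runA (cs : List Char) (d : Int) (cur : List Char) : List (List Char) :=
  finishA (cs.foldl stepA ([], d, cur))

theorem finishA_foldl (cs : List Char) (parts : List (List Char)) (d : Int) (cur : List Char) :
    finishA (cs.foldl stepA (parts, d, cur)) = parts ++ runA cs d cur := by
  induction cs generalizing parts d cur with
  | nil =>
    simp only [runA, List.foldl_nil, finishA]
    split_ifs <;> simp
  | cons c cs ih =>
    simp only [runA, List.foldl_cons, stepA]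
    split_ifs with h1 h2 h3
    · exact ih _ _ _
    · exact ih _ _ _
    · rw [ih, ih]; simp
    · exact ih _ _ _

theorem runA_eq (cs : List Char) (d : Int) (cur : List Char) :
    runA cs d cur =
      match firstTopComma d cs with
      | some i => PySem.Chars.strip (cur ++ cs.take i) :: runA (cs.drop (i + 1)) 0 []
      | none =>
        if PySem.Chars.strip (cur ++ cs) ≠ [] then [PySem.Chars.strip (cur ++ cs)] else [] := by
  induction cs generalizing d cur with
  | nil => simp [runA, finishA, firstTopComma]
  | cons c cs ih =>
    by_cases h1 : c = '('
    · subst h1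
      have hL : runA ('(' :: cs) d cur = runA cs (d + 1) (cur ++ ['(']) := by
        simp [runA, List.foldl_cons, stepA]
      have hR : firstTopComma d ('(' :: cs) = (firstTopComma (d + 1) cs).map (· + 1) := by
        simp [firstTopComma]
      rw [hL, hR, ih]
      cases hfc : firstTopComma (d + 1) cs <;> simp [List.append_assoc]
    · by_cases h2 : c = ')'
      · subst h2
        have hL : runA (')' :: cs) d cur = runA cs (d - 1) (cur ++ [')']) := by
          simp [runA, List.foldl_cons, stepA]
        have hR : firstTopComma d (')' :: cs) = (firstTopComma (d - 1) cs).map (· + 1) := by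
          simp [firstTopComma]
        rw [hL, hR, ih]
        cases hfc : firstTopComma (d - 1) cs <;> simp [List.append_assoc]
      · by_cases h3 : c = ',' ∧ d = 0
        · obtain ⟨rfl, rfl⟩ := h3
          have hL : runA (',' :: cs) 0 cur
              = finishA (List.foldl stepA ([PySem.Chars.strip cur], 0, []) cs) := by
            simp [runA, List.foldl_cons, stepA]
          have hR : firstTopComma 0 (',' :: cs) = some 0 := by
            simp [firstTopComma]
          rw [hL, finishA_foldl, hR]
          simp
        · have hL : runA (c :: cs) d cur = runA cs d (cur ++ [c]) := by
            simp [runA, List.foldl_cons, stepA, h1, h2, h3]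
          have hR : firstTopComma d (c :: cs) = (firstTopComma d cs).map (· + 1) := by
            simp [firstTopComma, h1, h2, h3]
          rw [hL, hR, ih]
          cases hfc : firstTopComma d cs <;> simp [List.append_assoc]

theorem altGo_eq_runA (cs : List Char) : altGo cs = runA cs 0 [] := by
  rw [altGo, runA_eq]
  cases hfc : firstTopComma 0 cs with
  | none => simp
  | some i =>
    have ih := altGo_eq_runA (cs.drop (i + 1))
    simp [ih]
termination_by cs.length
decreasing_by
  have := firstTopComma_lt 0 cs i hfc
  simp; omega

-- ===== VERDICT (by name: the statement is the Claim_ definition above) =====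
theorem parse_args_toplevel_spec : Claim_equal_parse_args_toplevel := by
  intro inner _
  unfold Spec_parse_args_toplevel parse_args_toplevel parse_args_toplevel_alt
  rw [altGo_eq_runA]
  rfl
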